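-- pv_equiv track=rewrite | github.com/chandramgc/py-projects | src/modules/p_rule_counter.py | get_common_rules
-- ===== SOURCE A (Python) =====
-- def get_common_rules(file_rules=None):
--     """
--     Computes and returns the set of rules common to all files.
--
--     Args:
--         file_rules (dict, optional): A dictionary mapping file names to sets of rules.
--
--     Returns:
--         set: The intersection of rule sets from all files.
--     """
--     file_rules = file_rules if file_rules is not None else file_rules
--     all_rules = list(file_rules.values())
--     if not all_rules:
--         return set()
--     common = all_rules[0].copy()
--     for rules in all_rules[1:]:
--         common = common.intersection(rules)
--     return common
-- ===== SOURCE B (Python) =====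
-- def get_common_rules(file_rules=None):
--     """Frequency-count re-implementation: a rule is common iff it occurs in
--     every file's set, i.e. its count over all sets equals the number of files."""
--     all_rules = list(file_rules.values())
--     counts = {}
--     for rules in all_rules:
--         for rule in rules:
--             counts[rule] = counts.get(rule, 0) + 1
--     n = len(all_rules)
--     return {rule for rule, c in counts.items() if c == n}
-- ===== Notes on version B (the rewrite author's own statement) =====
-- stated objective: alternative
-- what changed: Replaces the fold of pairwise set intersections with a single frequency count over all rule sets: a rule is common iff its occurrence count equals the number of files.
-- outside the precondition, e.g. on get_common_rules({'f1': ['a', 'a']}): A returns {'a'}, B returns set()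
import Mathlib
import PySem

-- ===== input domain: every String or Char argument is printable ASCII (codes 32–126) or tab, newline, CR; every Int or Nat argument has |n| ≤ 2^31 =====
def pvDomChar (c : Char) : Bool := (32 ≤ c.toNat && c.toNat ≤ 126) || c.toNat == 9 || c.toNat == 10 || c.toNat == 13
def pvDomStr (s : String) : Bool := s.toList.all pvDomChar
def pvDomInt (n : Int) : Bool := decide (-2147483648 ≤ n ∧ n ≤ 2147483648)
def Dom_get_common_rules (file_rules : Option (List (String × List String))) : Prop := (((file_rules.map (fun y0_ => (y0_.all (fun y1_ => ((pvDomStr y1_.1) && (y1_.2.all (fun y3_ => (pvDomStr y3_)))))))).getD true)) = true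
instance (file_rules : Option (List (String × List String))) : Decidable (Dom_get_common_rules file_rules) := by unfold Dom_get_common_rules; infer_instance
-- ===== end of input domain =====

-- B replaces the fold of pairwise set intersections by one frequency count over all
-- rule sets: a rule is common iff its count equals the number of files (objective: alternative).

-- ===== PORT A =====
def get_common_rules (file_rules : Option (List (String × List String))) : List String :=
  match file_rules with
  | none => []      -- Python: file_rules.values() raises AttributeError on None; excluded by Pre_
  | some fr =>
    let all_rules := (PySem.Dict.ofList fr).values
    match all_rules with
    | [] => []
    | h :: t =>      -- common = all_rules[0].copy(); for rules in all_rules[1:]: common = common.intersection(rules)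
      t.foldl (fun common rules => PySem.Set.inter common rules) h

-- ===== PORT B =====
def get_common_rules_alt (file_rules : Option (List (String × List String))) : List String :=
  match file_rules with
  | none => []      -- Python: file_rules.values() raises AttributeError on None; excluded by Pre_
  | some fr =>
    let all_rules := (PySem.Dict.ofList fr).values
    let counts := all_rules.foldl
      (fun c rules => rules.foldl (fun c rule => c.insert rule (c.getD rule 0 + 1)) c)
      PySem.Dict.empty
    let n : Int := all_rules.length
    (counts.items.filter (fun p => p.2 == n)).map (fun p => p.1)

-- ===== PRECONDITION & SPEC =====
-- Pre_ excludes None (A raises AttributeError there) and inner lists with duplicate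
-- elements, which do not represent Python sets (the type convention maps each set[str]
-- value to a list of DISTINCT elements).
def Pre_get_common_rules (file_rules : Option (List (String × List String))) : Prop :=
  file_rules.isSome = true ∧ ∀ p ∈ file_rules.getD [], (p.2).Nodup
instance (file_rules : Option (List (String × List String))) : Decidable (Pre_get_common_rules file_rules) := by unfold Pre_get_common_rules; infer_instance

def pvWitness_get_common_rules : (Option (List (String × List String))) :=
  some [("f1", ["a", "b"]), ("f2", ["b", "c"])]

def Spec_get_common_rules (file_rules : Option (List (String × List String))) (out : List String) : Prop := out = get_common_rules_alt file_rules
instance (file_rules : Option (List (String × List String))) (out : List String) : Decidable (Spec_get_common_rules file_rules out) := by unfold Spec_get_common_rules; infer_instance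

-- ===== CLAIM (what is proved, stated in full; the proofs are below) =====
def Claim_equal_get_common_rules : Prop := ∀ (file_rules : Option (List (String × List String))), Dom_get_common_rules file_rules → Pre_get_common_rules file_rules → Spec_get_common_rules file_rules (get_common_rules file_rules)

-- ===== LEMMAS AND PROOFS =====

-- every value of the dict built from fr is the second component of some pair of fr
theorem mem_values_foldl_insert {κ ν : Type} [BEq κ] [LawfulBEq κ]
    (ps : List (κ × ν)) (d : PySem.Dict κ ν) (w : ν)
    (h : w ∈ (ps.foldl (fun acc p => acc.insert p.1 p.2) d).values) :
    w ∈ d.values ∨ ∃ p ∈ ps, w = p.2 := by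
  induction ps generalizing d with
  | nil => exact Or.inl h
  | cons q qs ih =>
    rcases ih (d.insert q.1 q.2) h with h' | ⟨p, hp, he⟩
    · rcases PySem.Dict.mem_values_insert d q.1 q.2 w h' with he | h'
      · exact Or.inr ⟨q, List.mem_cons_self .., he⟩
      · exact Or.inl h'
    · exact Or.inr ⟨p, List.mem_cons_of_mem _ hp, he⟩

-- A's intersection fold is a single filter over the first set
theorem foldl_inter_eq_filter {α : Type} [BEq α] [LawfulBEq α]
    (t : List (List α)) (h : List α) :
    t.foldl (fun common rules => PySem.Set.inter common rules) h
      = h.filter (fun x => t.all (fun v => v.contains x)) := by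
  induction t generalizing h with
  | nil => simp
  | cons v t ih =>
    rw [List.foldl_cons, ih]
    rw [show PySem.Set.inter h v = h.filter (fun x => PySem.Set.contains v x) from rfl]
    rw [List.filter_filter]
    apply List.filter_congr
    intro x _
    by_cases hv : v.contains x <;>
      simp [List.all_cons, PySem.Set.contains, Bool.and_comm]

theorem count_flatten_le {α : Type} [BEq α] [LawfulBEq α]
    (t : List (List α)) (hnd : ∀ v ∈ t, v.Nodup) (x : α) :
    (t.flatten).count x ≤ t.length := by
  induction t with
  | nil => simp
  | cons v t ih =>
    have h1 : v.count x ≤ 1 :=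
      (List.nodup_iff_count_le_one.mp (hnd v (List.mem_cons_self ..))) x
    have h2 := ih (fun w hw => hnd w (List.mem_cons_of_mem _ hw))
    simp only [List.flatten_cons, List.count_append, List.length_cons]
    omega

theorem count_flatten_eq_iff {α : Type} [BEq α] [LawfulBEq α]
    (t : List (List α)) (hnd : ∀ v ∈ t, v.Nodup) (x : α) :
    (t.flatten).count x = t.length ↔ ∀ v ∈ t, x ∈ v := by
  induction t with
  | nil => simp
  | cons v t ih =>
    have h1 : v.count x ≤ 1 :=
      (List.nodup_iff_count_le_one.mp (hnd v (List.mem_cons_self ..))) x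
    have h2 := count_flatten_le t (fun w hw => hnd w (List.mem_cons_of_mem _ hw)) x
    have h3 := ih (fun w hw => hnd w (List.mem_cons_of_mem _ hw))
    have h4 : x ∈ v ↔ v.count x = 1 := by
      constructor
      · intro hx; have := List.count_pos_iff.mpr hx; omega
      · intro hc; exact List.count_pos_iff.mp (by omega)
    simp only [List.flatten_cons, List.count_append, List.length_cons, List.forall_mem_cons]
    constructor
    · intro he
      have hv : v.count x = 1 := by omega
      exact ⟨h4.mpr hv, h3.mp (by omega)⟩
    · rintro ⟨hxv, hall⟩
      have := h4.mp hxv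
      have := h3.mpr hall
      omega

-- B's computation, unfolded to a filter over the deduplicated flattening
theorem alt_eq_filter {α : Type} [BEq α] [LawfulBEq α] (vals : List (List α)) :
    ((vals.foldl
        (fun c rules => rules.foldl (fun c rule => c.insert rule (c.getD rule 0 + 1)) c)
        PySem.Dict.empty).items.filter
          (fun p => p.2 == (vals.length : Int))).map (fun p => p.1)
      = (PySem.Set.ofList vals.flatten).filter
          (fun x => ((vals.flatten.count x : Int)) == (vals.length : Int)) := by
  have h1 : vals.foldl
      (fun c rules => rules.foldl (fun c rule => c.insert rule (c.getD rule 0 + 1)) c)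
      PySem.Dict.empty = PySem.Dict.counter vals.flatten := by
    rw [← PySem.Dict.foldl_insert_getD_add_one_eq_counter, List.foldl_flatten]
  rw [h1, PySem.Dict.items_counter, List.filter_map, List.map_map]
  simp [Function.comp_def]

theorem ports_agree (fr : List (String × List String))
    (hnd : ∀ p ∈ fr, (p.2).Nodup) :
    get_common_rules (some fr) = get_common_rules_alt (some fr) := by
  have hvals : ∀ v ∈ (PySem.Dict.ofList fr).values, v.Nodup := by
    intro v hv
    rcases mem_values_foldl_insert fr PySem.Dict.empty v hv with h | ⟨p, hp, he⟩
    · simp [PySem.Dict.empty, PySem.Dict.values] at h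
    · exact he ▸ hnd p hp
  have hA : get_common_rules (some fr)
      = match (PySem.Dict.ofList fr).values with
        | [] => []
        | h :: t => t.foldl (fun common rules => PySem.Set.inter common rules) h := rfl
  have hB : get_common_rules_alt (some fr)
      = (PySem.Set.ofList ((PySem.Dict.ofList fr).values).flatten).filter
          (fun x => (((((PySem.Dict.ofList fr).values).flatten).count x : Int))
            == (((PySem.Dict.ofList fr).values).length : Int)) := alt_eq_filter _
  rw [hA, hB]
  generalize hgen : (PySem.Dict.ofList fr).values = vals at hvals ⊢
  cases vals with
  | nil => simp
  | cons h t =>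
    have hh : h.Nodup := hvals h (List.mem_cons_self ..)
    have ht : ∀ v ∈ t, v.Nodup := fun v hv' => hvals v (List.mem_cons_of_mem _ hv')
    show t.foldl (fun common rules => PySem.Set.inter common rules) h = _
    rw [foldl_inter_eq_filter]
    simp only [List.flatten_cons, PySem.Set.ofList_append,
      PySem.Set.update_eq_append_filter, PySem.Set.ofList_eq_self_of_nodup h hh,
      List.filter_append, List.filter_filter]
    have hcount : ∀ x ∈ h, (((h ++ t.flatten).count x : Int) == ((h :: t).length : Int))
        = t.all (fun v => v.contains x) := by
      intro x hx
      have h1 : h.count x = 1 := by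
        have hle := (List.nodup_iff_count_le_one.mp hh) x
        have hpos := List.count_pos_iff.mpr hx
        omega
      have h2 := count_flatten_eq_iff t ht x
      have h3 := count_flatten_le t ht x
      by_cases hall : ∀ v ∈ t, x ∈ v
      · have hceq : (h ++ t.flatten).count x = (h :: t).length := by
          simp only [List.count_append, List.length_cons, h1, h2.mpr hall]
          omega
        rw [hceq]
        simp only [beq_self_eq_true]
        symm
        rw [List.all_eq_true]
        intro v hv
        simpa using hall v hv
      · have hne : (h ++ t.flatten).count x ≠ (h :: t).length := by
          simp only [List.count_append, List.length_cons, h1]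
          intro he
          exact hall (h2.mp (by omega))
        have : (((h ++ t.flatten).count x : Int) == ((h :: t).length : Int)) = false := by
          simp only [beq_eq_false_iff_ne, ne_eq, Nat.cast_inj]
          exact hne
        rw [this]
        symm
        rw [List.all_eq_false]
        push Not at hall
        rcases hall with ⟨v, hv, hxv⟩
        exact ⟨v, hv, by simpa using hxv⟩
    have hrest : (PySem.Set.ofList t.flatten).filter
        (fun y => (((h ++ t.flatten).count y : Int) == ((h :: t).length : Int))
          && !PySem.Set.contains h y) = [] := by
      rw [List.filter_eq_nil_iff]
      intro x _
      simp only [Bool.and_eq_true, Bool.not_eq_true', beq_iff_eq, not_and,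
        PySem.Set.contains]
      intro hcon2 hcon1
      have hx : x ∉ h := by
        intro hm
        rw [List.contains_eq_mem, decide_eq_false_iff_not] at hcon1
        exact hcon1 hm
      have hc : h.count x = 0 := List.count_eq_zero.mpr hx
      have hle := count_flatten_le t ht x
      have : (h ++ t.flatten).count x = (h :: t).length := by exact_mod_cast hcon2
      simp only [List.count_append, List.length_cons, hc] at this
      omega
    rw [hrest, List.append_nil]
    apply List.filter_congr
    intro x hx
    rw [hcount x hx]

-- ===== VERDICT (by name: the statement is the Claim_ definition above) =====
theorem get_common_rules_spec : Claim_equal_get_common_rules := by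
  intro file_rules _ hpre
  rcases hpre with ⟨hs, hnd⟩
  cases file_rules with
  | none => simp at hs
  | some fr =>
    simp only [Option.getD_some] at hnd
    exact ports_agree fr hnd
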